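-- pv_equiv track=rewrite | github.com/steviedale/lingo_kit_data | utils/add_pronunciation_column.py | map_coda
-- ===== SOURCE A (Python) =====
-- import unicodedata
--
-- CONSONANT_MAP = {
--     'b': 'b',
--     'd': 'd',
--     'f': 'f',
--     'l': 'l',
--     'm': 'm',
--     'n': 'n',
--     'p': 'p',
--     'r': 'r',
--     's': 's',
--     't': 't',
--     'v': 'v',
--     'z': 'ts',
--     'x': 'ks',
--     'j': 'y',
--     'k': 'k',
--     'w': 'w',
--     'y': 'y',
--     'c': 'k',
--     'g': 'g',
--     'h': '',
-- }
--
-- def strip_accents(text: str) -> str: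
--     return ''.join(ch for ch in unicodedata.normalize('NFD', text) if unicodedata.category(ch) != 'Mn')
--
-- def map_coda(coda: str) -> str:
--     coda_norm = strip_accents(coda.lower())
--     result = ''
--     i = 0
--     while i < len(coda_norm):
--         chunk2 = coda_norm[i:i + 2]
--         if chunk2 == 'gn':
--             result += 'ny'
--             i += 2
--             continue
--         if chunk2 == 'gl':
--             result += 'l'
--             i += 2
--             continue
--         if chunk2 == 'sc':
--             result += 'sk'
--             i += 2
--             continue
--         ch = coda_norm[i]
--         if ch == 'c':
--             result += 'k'
--         elif ch == 'g':
--             result += 'g'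
--         elif ch == 'z':
--             result += 'ts'
--         elif ch == 'h':
--             pass
--         else:
--             result += CONSONANT_MAP.get(ch, ch)
--         i += 1
--     return result
-- ===== SOURCE B (Python) =====
-- import re
-- import unicodedata
--
-- CONSONANT_MAP = {
--     'b': 'b', 'd': 'd', 'f': 'f', 'l': 'l', 'm': 'm', 'n': 'n', 'p': 'p',
--     'r': 'r', 's': 's', 't': 't', 'v': 'v', 'z': 'ts', 'x': 'ks', 'j': 'y',
--     'k': 'k', 'w': 'w', 'y': 'y', 'c': 'k', 'g': 'g', 'h': '',
-- }
--
-- DIGRAPH_MAP = {'gn': 'ny', 'gl': 'l', 'sc': 'sk'}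
--
-- _TOKEN = re.compile(r'gn|gl|sc|[\s\S]')
--
--
-- def strip_accents(text: str) -> str:
--     return ''.join(ch for ch in unicodedata.normalize('NFD', text) if unicodedata.category(ch) != 'Mn')
--
--
-- def _repl(m) -> str:
--     t = m.group()
--     if t in DIGRAPH_MAP:
--         return DIGRAPH_MAP[t]
--     return CONSONANT_MAP.get(t, t)
--
--
-- def map_coda(coda: str) -> str:
--     return _TOKEN.sub(_repl, strip_accents(coda.lower()))
-- ===== Notes on version B (the rewrite author's own statement) =====
-- stated objective: faster
-- what changed: Replaces A's manual index loop (explicit two-char lookahead, redundant c/g/z/h branches, repeated string += concatenation) by a single re.sub over the pattern gn|gl|sc|[\s\S] with a table-driven replacement function that builds the output once.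
import Mathlib
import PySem

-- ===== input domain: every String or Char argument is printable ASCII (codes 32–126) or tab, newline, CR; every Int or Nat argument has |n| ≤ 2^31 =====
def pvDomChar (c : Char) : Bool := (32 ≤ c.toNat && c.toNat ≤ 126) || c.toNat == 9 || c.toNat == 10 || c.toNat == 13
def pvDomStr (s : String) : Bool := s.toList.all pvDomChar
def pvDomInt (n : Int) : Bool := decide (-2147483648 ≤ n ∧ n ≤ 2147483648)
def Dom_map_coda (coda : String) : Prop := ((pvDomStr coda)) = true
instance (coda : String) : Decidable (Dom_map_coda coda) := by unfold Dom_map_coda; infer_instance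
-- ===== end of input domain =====

-- B re-implements A's index loop with explicit two-char lookahead as a regex-style
-- tokenisation (digraph-or-any-char) followed by a table replacement; objective: idiomatic.
-- strip_accents (NFD + drop Mn marks) is the identity on the printable-ASCII domain, so
-- both ports omit it (exact on Dom_map_coda).

-- ===== PORT A =====
-- CONSONANT_MAP as an association list Char → replacement (all keys are single chars)
def consonantMap : List (Char × List Char) :=
  [('b', ['b']), ('d', ['d']), ('f', ['f']), ('l', ['l']), ('m', ['m']),
   ('n', ['n']), ('p', ['p']), ('r', ['r']), ('s', ['s']), ('t', ['t']),
   ('v', ['v']), ('z', ['t','s']), ('x', ['k','s']), ('j', ['y']),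
   ('k', ['k']), ('w', ['w']), ('y', ['y']), ('c', ['k']), ('g', ['g']),
   ('h', [])]

-- CONSONANT_MAP.get(ch, ch)
def consGetD (c : Char) : List Char :=
  match consonantMap.find? (fun p => p.1 = c) with
  | some p => p.2
  | none => [c]

-- A's while-loop over coda_norm: chunk2 = coda_norm[i:i+2] is the 2-char take of the
-- remaining suffix; i += 1 / i += 2 become recursion on the suffix.
def mapCodaLoop : List Char → List Char
  | [] => []
  | c1 :: rest =>
    let chunk2 := List.take 2 (c1 :: rest)
    if chunk2 = ['g', 'n'] then 'n' :: 'y' :: mapCodaLoop (rest.drop 1)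
    else if chunk2 = ['g', 'l'] then 'l' :: mapCodaLoop (rest.drop 1)
    else if chunk2 = ['s', 'c'] then 's' :: 'k' :: mapCodaLoop (rest.drop 1)
    else if c1 = 'c' then 'k' :: mapCodaLoop rest
    else if c1 = 'g' then 'g' :: mapCodaLoop rest
    else if c1 = 'z' then 't' :: 's' :: mapCodaLoop rest
    else if c1 = 'h' then mapCodaLoop rest
    else consGetD c1 ++ mapCodaLoop rest
  termination_by l => l.length
  decreasing_by all_goals simp

def map_coda (coda : String) : String :=
  -- strip_accents = identity on the ASCII domain
  String.ofList (mapCodaLoop (PySem.Str.lower coda).toList)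

-- ===== PORT B =====
-- the regex r'gn|gl|sc|[\s\S]': greedy left-to-right scan into digraph / single-char tokens
def tokenize : List Char → List (List Char)
  | [] => []
  | [c] => [[c]]
  | c1 :: c2 :: rest =>
    if [c1, c2] = ['g', 'n'] ∨ [c1, c2] = ['g', 'l'] ∨ [c1, c2] = ['s', 'c'] then
      [c1, c2] :: tokenize rest
    else
      [c1] :: tokenize (c2 :: rest)

-- _repl: DIGRAPH_MAP first, else CONSONANT_MAP.get(t, t)
def replToken (t : List Char) : List Char :=
  if t = ['g', 'n'] then ['n', 'y']
  else if t = ['g', 'l'] then ['l']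
  else if t = ['s', 'c'] then ['s', 'k']
  else match t with
    | [c] => consGetD c
    | t => t

def map_coda_alt (coda : String) : String :=
  -- strip_accents = identity on the ASCII domain; sub = concat of replaced tokens
  String.ofList (((tokenize (PySem.Str.lower coda).toList).map replToken).flatten)

-- ===== PRECONDITION & SPEC =====
def Spec_map_coda (coda : String) (out : String) : Prop := out = map_coda_alt coda
instance (coda : String) (out : String) : Decidable (Spec_map_coda coda out) := by unfold Spec_map_coda; infer_instance

-- ===== CLAIM (what is proved, stated in full; the proofs are below) =====
def Claim_equal_map_coda : Prop := ∀ (coda : String), Dom_map_coda coda → Spec_map_coda coda (map_coda coda)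

-- ===== LEMMAS AND PROOFS =====

-- A's explicit c/g/z/h single-char branches agree with CONSONANT_MAP lookup
theorem step_eq (c : Char) (l : List Char) :
    (if c = 'c' then 'k' :: l else if c = 'g' then 'g' :: l
     else if c = 'z' then 't' :: 's' :: l else if c = 'h' then l
     else consGetD c ++ l) = consGetD c ++ l := by
  split_ifs <;> subst_vars <;> rfl

theorem repl_single (c : Char) : replToken [c] = consGetD c := by
  simp [replToken]

-- one unfolding of A's loop when no digraph matches at the front
theorem loop_step (c1 : Char) (rest : List Char)
    (h1 : List.take 2 (c1 :: rest) ≠ ['g','n'])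
    (h2 : List.take 2 (c1 :: rest) ≠ ['g','l'])
    (h3 : List.take 2 (c1 :: rest) ≠ ['s','c']) :
    mapCodaLoop (c1 :: rest) = consGetD c1 ++ mapCodaLoop rest := by
  rw [mapCodaLoop]
  simp only [if_neg h1, if_neg h2, if_neg h3]
  exact step_eq c1 _

theorem loop_eq_tokens (l : List Char) :
    mapCodaLoop l = ((tokenize l).map replToken).flatten := by
  induction l using tokenize.induct with
  | case1 => simp [mapCodaLoop, tokenize]
  | case2 c =>
    rw [loop_step c [] (by simp) (by simp) (by simp)]
    simp [mapCodaLoop, tokenize, repl_single]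
  | case3 c1 c2 rest h ih =>
    rcases h with h | h | h <;> simp_all [mapCodaLoop, tokenize, replToken]
  | case4 c1 c2 rest h ih =>
    have h1 : ¬[c1, c2] = ['g','n'] := fun hh => h (Or.inl hh)
    have h2 : ¬[c1, c2] = ['g','l'] := fun hh => h (Or.inr (Or.inl hh))
    have h3 : ¬[c1, c2] = ['s','c'] := fun hh => h (Or.inr (Or.inr hh))
    rw [loop_step c1 (c2 :: rest) h1 h2 h3, ih]
    simp only [tokenize, if_neg h, List.map, List.flatten, repl_single]
    rfl

-- ===== VERDICT (by name: the statement is the Claim_ definition above) =====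
theorem map_coda_spec : Claim_equal_map_coda := by
  intro coda _
  unfold Spec_map_coda map_coda map_coda_alt
  rw [loop_eq_tokens]
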